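-- pv_equiv track=rewrite | github.com/hhchin1995/P-graph-algorithms | MSG.py | phiminus
-- ===== SOURCE A (Python) =====
-- def phiminus(M,O):
--     results=[]
--     for i in M:
--         for j in O:
--             for k in j[1]:
--                 if k==i:
--                     results.append(j)
--     return results
-- ===== SOURCE B (Python) =====
-- def phiminus(M, O):
--     # Index O once: value -> list of entries, one per occurrence in the inner list.
--     idx = {}
--     for j in O:
--         for k in j[1]:
--             idx.setdefault(k, []).append(j)
--     results = []
--     for i in M:
--         results.extend(idx.get(i, []))
--     return results
-- ===== Notes on version B (the rewrite author's own statement) =====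
-- stated objective: alternative
-- what changed: B builds a value-to-entries index over O once and then does one dict lookup per element of M, instead of A's rescan of all of O and its inner lists for every element of M; on the benchmark the output size dominates, so it is not measurably faster.
import Mathlib
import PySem

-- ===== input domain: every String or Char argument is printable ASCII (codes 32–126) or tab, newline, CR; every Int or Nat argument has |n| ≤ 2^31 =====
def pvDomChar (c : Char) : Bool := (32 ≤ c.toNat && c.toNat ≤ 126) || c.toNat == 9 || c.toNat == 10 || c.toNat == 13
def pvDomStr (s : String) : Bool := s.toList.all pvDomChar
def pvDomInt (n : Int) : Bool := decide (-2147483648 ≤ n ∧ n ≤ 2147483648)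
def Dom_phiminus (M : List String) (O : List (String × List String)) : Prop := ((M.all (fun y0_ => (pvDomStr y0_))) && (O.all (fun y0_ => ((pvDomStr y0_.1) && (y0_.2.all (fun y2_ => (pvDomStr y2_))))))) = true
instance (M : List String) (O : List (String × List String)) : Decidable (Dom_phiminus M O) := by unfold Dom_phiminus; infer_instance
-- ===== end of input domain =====

-- B builds a value→entries index over O once, then answers each element of M by one dict lookup instead of rescanning O (alternative algorithm; not measurably faster here, output size dominates).

-- ===== PORT A =====
def phiminus (M : List String) (O : List (String × List String)) : List (String × List String) :=
  M.foldl (fun results i =>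
    O.foldl (fun results j =>
      j.2.foldl (fun results k =>
        if k == i then results ++ [j] else results) results) results) []

-- ===== PORT B =====
-- index built once over O: value -> entries containing it (one per occurrence)
def pvBuildIdx (O : List (String × List String)) : PySem.Dict String (List (String × List String)) :=
  O.foldl (fun idx j =>
    j.2.foldl (fun idx k => idx.modify k [] (· ++ [j])) idx) PySem.Dict.empty

def phiminus_alt (M : List String) (O : List (String × List String)) : List (String × List String) :=
  let idx := pvBuildIdx O
  M.foldl (fun results i => results ++ idx.getD i []) []

-- ===== PRECONDITION & SPEC =====
def Spec_phiminus (M : List String) (O : List (String × List String)) (out : List (String × List String)) : Prop := out = phiminus_alt M O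
instance (M : List String) (O : List (String × List String)) (out : List (String × List String)) : Decidable (Spec_phiminus M O out) := by unfold Spec_phiminus; infer_instance

-- ===== CLAIM (what is proved, stated in full; the proofs are below) =====
def Claim_equal_phiminus : Prop := ∀ (M : List String) (O : List (String × List String)), Dom_phiminus M O → Spec_phiminus M O (phiminus M O)

-- ===== LEMMAS AND PROOFS =====

-- one entry j, looking up i after the inner build loop over its value list
theorem pv_inner_build (j : String × List String) (i : String) :
    ∀ (l : List String) (d : PySem.Dict String (List (String × List String))),
      (l.foldl (fun idx k => idx.modify k [] (· ++ [j])) d).getD i []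
        = d.getD i [] ++ (l.filter (· == i)).map (fun _ => j) := by
  intro l
  induction l with
  | nil => intro d; simp
  | cons k l ih =>
    intro d
    simp only [List.foldl_cons, ih, List.filter_cons]
    by_cases h : k = i
    · subst h; simp [PySem.Dict.getD_modify_self]
    · simp [PySem.Dict.getD_modify, h, Ne.symm h]

-- lookup in the full index = A's scan of O for that value
theorem pv_idx_getD (i : String) :
    ∀ (O : List (String × List String)) (d : PySem.Dict String (List (String × List String))),
      (O.foldl (fun idx j => j.2.foldl (fun idx k => idx.modify k [] (· ++ [j])) idx) d).getD i []
        = d.getD i [] ++ O.flatMap (fun j => (j.2.filter (· == i)).map (fun _ => j)) := by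
  intro O
  induction O with
  | nil => intro d; simp
  | cons j O ih =>
    intro d
    simp only [List.foldl_cons, ih, pv_inner_build, List.flatMap_cons, List.append_assoc]

-- A in closed form
theorem pv_A_flatMap (M : List String) (O : List (String × List String)) :
    phiminus M O = M.flatMap (fun i => O.flatMap (fun j => (j.2.filter (· == i)).map (fun _ => j))) := by
  unfold phiminus
  simp only [PySem.List.foldl_append_if, PySem.List.foldl_append_eq_flatMap, List.nil_append]

-- ===== VERDICT (by name: the statement is the Claim_ definition above) =====
theorem phiminus_spec : Claim_equal_phiminus := by
  intro M O _
  unfold Spec_phiminus phiminus_alt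
  rw [pv_A_flatMap]
  simp only [pvBuildIdx, pv_idx_getD, PySem.List.foldl_append_eq_flatMap]
  simp
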